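-- pv_equiv track=rewrite | github.com/StephenYPan/improved-heuristcs-disjoint-cbs | cbs.py | find_cardinal_conflict
-- ===== SOURCE A (Python) =====
-- def find_extended_mdd_conflict(mdds, paths):
--     """
--     Return true if there exists a cardinal conflict with the extended mdd, otherwise false.
--     """
--     start = min(len(paths[0]), len(paths[1]))
--     end = max(len(paths[0]), len(paths[1]))
--     if start == end:
--         return False
--     if len(paths[0]) > len(paths[1]):
--         mdds[0], mdds[1] = mdds[1], mdds[0]
--         paths[0], paths[1] = paths[1], paths[0]
--     vertex = paths[0][-1]
--     mdd = [(t, e) for t, e in mdds[1] if t >= start]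
--     for i in range(start, end):
--         mdd_vertex = set([e[1] for t, e in mdd if t == i])
--         if len(mdd_vertex) == 1 and mdd_vertex == {vertex}:
--             return True
--     return False
--
-- def find_cardinal_conflict(mdds, paths):
--     """
--     Return true if there exists a cardinal conflict, otherwise false.
--     """
--     min_timestep = min(len(paths[0]), len(paths[1]))
--     for i in range(1, min_timestep):
--         agent1_edge = [(v, u) for t, (u, v) in mdds[0] if t == i]
--         agent2_edge = [e for t, e in mdds[1] if t == i]
--         if len(agent1_edge) == 1 and len(agent2_edge) == 1 and agent1_edge == agent2_edge:
--             return True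
--         agent1_vertex = set([e[0] for e in agent1_edge])
--         agent2_vertex = set([e[1] for e in agent2_edge])
--         if len(agent1_vertex) == 1 and len(agent2_vertex) == 1 and agent1_vertex == agent2_vertex:
--             return True
--     return find_extended_mdd_conflict(mdds, paths)
-- ===== SOURCE B (Python) =====
-- def _summarize(mdd):
--     """One pass over the edges: timestep -> (edge_count, first_edge, common_target_vertex_or_None)."""
--     s = {}
--     for t, (u, v) in mdd:
--         if t in s:
--             c, e, w = s[t]
--             s[t] = (c + 1, e, w if w == v else None)
--         else:
--             s[t] = (1, (u, v), v)
--     return s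
--
-- def find_cardinal_conflict(mdds, paths):
--     """Stream each MDD once into per-timestep summaries (count, first edge,
--     common target vertex), then iterate over the summaries' KEYS only — never
--     over the timestep range and never re-scanning an edge list.  Return value
--     only: unlike A, this does not swap mdds/paths in place."""
--     n0, n1 = len(paths[0]), len(paths[1])
--     lo, hi = min(n0, n1), max(n0, n1)
--     s0 = _summarize(mdds[0])
--     s1 = _summarize(mdds[1])
--     for t, (c1, e1, u1) in s0.items():
--         if 1 <= t < lo and t in s1:
--             c2, e2, u2 = s1[t]
--             if c1 == 1 and c2 == 1 and (e1[1], e1[0]) == e2: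
--                 return True
--             if u1 is not None and u1 == u2:
--                 return True
--     if lo == hi:
--         return False
--     vertex, slong = (paths[0][-1], s1) if n0 < n1 else (paths[1][-1], s0)
--     return any(lo <= t < hi and u == vertex for t, (_, _, u) in slong.items())
-- ===== Notes on version B (the rewrite author's own statement) =====
-- stated objective: alternative
-- what changed: B streams each MDD once into a per-timestep summary (edge count, first edge, common target vertex) and then iterates over the summaries' keys only, instead of A's loop over every timestep with a fresh comprehension scan of both whole MDD edge lists per timestep; B also drops A's in-place swap of mdds/paths (return value only).
-- outside the precondition, e.g. on find_cardinal_conflict([], [[], []]): A returns False, B raises IndexError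
import Mathlib
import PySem

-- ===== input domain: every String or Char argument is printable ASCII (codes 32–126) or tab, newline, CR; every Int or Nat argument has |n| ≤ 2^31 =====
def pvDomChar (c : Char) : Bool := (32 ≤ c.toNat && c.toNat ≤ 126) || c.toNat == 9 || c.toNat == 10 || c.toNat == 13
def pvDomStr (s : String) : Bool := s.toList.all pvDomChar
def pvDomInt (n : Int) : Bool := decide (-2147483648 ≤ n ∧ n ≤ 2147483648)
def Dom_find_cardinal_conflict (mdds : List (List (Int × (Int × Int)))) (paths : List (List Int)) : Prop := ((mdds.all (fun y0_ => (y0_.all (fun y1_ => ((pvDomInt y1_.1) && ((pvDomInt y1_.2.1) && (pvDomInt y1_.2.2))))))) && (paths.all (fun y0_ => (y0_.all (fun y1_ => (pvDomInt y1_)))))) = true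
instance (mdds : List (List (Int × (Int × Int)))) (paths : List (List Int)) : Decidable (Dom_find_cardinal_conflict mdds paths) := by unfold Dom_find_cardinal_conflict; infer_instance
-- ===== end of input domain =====

-- B streams each MDD once into per-timestep summaries (count, first edge, common target vertex) and then loops over the
-- summaries' keys instead of A's per-timestep re-scan of both whole edge lists; equivalence is about the RETURN value
-- only: A swaps mdds/paths in place when path 0 is longer, B does not mutate.


-- ===== PORT A =====
-- helper of A: find_extended_mdd_conflict (the list indexing is total via getD; Pre_ guarantees
-- the indices A actually reaches are in range)
def find_extended_mdd_conflict (mdds : List (List (Int × (Int × Int)))) (paths : List (List Int)) : Bool :=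
  let p0 := paths.getD 0 []
  let p1 := paths.getD 1 []
  let start : Int := min (PySem.List.len p0) (PySem.List.len p1)
  let stop : Int := max (PySem.List.len p0) (PySem.List.len p1)
  if start == stop then false
  else
    -- the in-place swap: after it, paths[0] is the shorter path and mdds[1] the longer agent's mdd
    let shortp := if PySem.List.len p0 > PySem.List.len p1 then p1 else p0
    let mdd1 := if PySem.List.len p0 > PySem.List.len p1 then mdds.getD 0 [] else mdds.getD 1 []
    let vertex := PySem.List.pyGetD shortp (-1) 0
    let mdd := mdd1.filter (fun te => decide (start ≤ te.1))
    (PySem.List.pyRange start stop 1).any (fun i =>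
      let mdd_vertex := PySem.Set.ofList ((mdd.filter (fun te => te.1 == i)).map (fun te => te.2.2))
      PySem.List.len mdd_vertex == 1 && decide (mdd_vertex = [vertex]))

def find_cardinal_conflict (mdds : List (List (Int × (Int × Int)))) (paths : List (List Int)) : Bool :=
  let min_timestep : Int := min (PySem.List.len (paths.getD 0 [])) (PySem.List.len (paths.getD 1 []))
  if (PySem.List.pyRange 1 min_timestep 1).any (fun i =>
      let agent1_edge : List (Int × Int) := ((mdds.getD 0 []).filter (fun te => te.1 == i)).map (fun te => (te.2.2, te.2.1))
      let agent2_edge : List (Int × Int) := ((mdds.getD 1 []).filter (fun te => te.1 == i)).map (fun te => te.2)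
      (PySem.List.len agent1_edge == 1 && PySem.List.len agent2_edge == 1
         && decide (agent1_edge = agent2_edge)) ||
      (let agent1_vertex : List Int := PySem.Set.ofList (agent1_edge.map (fun e => e.1))
       let agent2_vertex : List Int := PySem.Set.ofList (agent2_edge.map (fun e => e.2))
       PySem.List.len agent1_vertex == 1 && PySem.List.len agent2_vertex == 1
         && decide (agent1_vertex = agent2_vertex)))
  then true
  else find_extended_mdd_conflict mdds paths

-- ===== PORT B =====
-- B-side helper: one streaming pass — dict timestep ↦ (edge count, first edge, common target vertex or none)
def fcc_step (s : PySem.Dict Int (Int × (Int × Int) × Option Int)) (te : Int × (Int × Int)) :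
    PySem.Dict Int (Int × (Int × Int) × Option Int) :=
  s.insert te.1 (match s.get? te.1 with
    | some (c, e, w) => (c + 1, e, if w = some te.2.2 then w else none)
    | none => (1, te.2, some te.2.2))

def fcc_summarize (m : List (Int × (Int × Int))) : PySem.Dict Int (Int × (Int × Int) × Option Int) :=
  m.foldl fcc_step PySem.Dict.empty

def find_cardinal_conflict_alt (mdds : List (List (Int × (Int × Int)))) (paths : List (List Int)) : Bool :=
  let p0 := paths.getD 0 []
  let p1 := paths.getD 1 []
  let n0 : Int := PySem.List.len p0
  let n1 : Int := PySem.List.len p1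
  let lo : Int := min n0 n1
  let hi : Int := max n0 n1
  let s0 := fcc_summarize (mdds.getD 0 [])
  let s1 := fcc_summarize (mdds.getD 1 [])
  if s0.items.any (fun tv =>
      decide (1 ≤ tv.1 ∧ tv.1 < lo) &&
      (match s1.get? tv.1 with
       | none => false
       | some (c2, e2, u2) =>
         (tv.2.1 == 1 && c2 == 1 && ((tv.2.2.1.2, tv.2.2.1.1) == e2)) ||
         (tv.2.2.2.isSome && tv.2.2.2 == u2)))
  then true
  else if lo == hi then false
  else
    let vertex := if n0 < n1 then PySem.List.pyGetD p0 (-1) 0 else PySem.List.pyGetD p1 (-1) 0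
    let slong := if n0 < n1 then s1 else s0
    slong.items.any (fun tv => decide (lo ≤ tv.1 ∧ tv.1 < hi) && tv.2.2.2 == some vertex)

-- ===== PRECONDITION & SPEC =====
-- Pre_ is the two-agent shape: at least two mdds and two paths, and — when the path lengths differ —
-- both paths nonempty (on an empty shorter path A raises IndexError at paths[0][-1]).  It excludes the
-- degenerate inputs with fewer than two mdds on which A happens to return False without ever indexing
-- mdds (both paths of equal length < 2): B's upfront summarizing indexes mdds[0]/mdds[1] and raises there.
def Pre_find_cardinal_conflict (mdds : List (List (Int × (Int × Int)))) (paths : List (List Int)) : Prop :=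
  2 ≤ mdds.length ∧ 2 ≤ paths.length ∧
    ((paths.getD 0 []).length = (paths.getD 1 []).length ∨
      (paths.getD 0 [] ≠ [] ∧ paths.getD 1 [] ≠ []))
instance (mdds : List (List (Int × (Int × Int)))) (paths : List (List Int)) : Decidable (Pre_find_cardinal_conflict mdds paths) := by unfold Pre_find_cardinal_conflict; infer_instance

def pvWitness_find_cardinal_conflict : (List (List (Int × (Int × Int)))) × List (List Int) :=
  ([[(1, (0, 1))], [(1, (0, 1))]], [[0, 1], [0, 1]])

def Spec_find_cardinal_conflict (mdds : List (List (Int × (Int × Int)))) (paths : List (List Int)) (out : Bool) : Prop := out = find_cardinal_conflict_alt mdds paths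
instance (mdds : List (List (Int × (Int × Int)))) (paths : List (List Int)) (out : Bool) : Decidable (Spec_find_cardinal_conflict mdds paths out) := by unfold Spec_find_cardinal_conflict; infer_instance

-- ===== CLAIM (what is proved, stated in full; the proofs are below) =====
def Claim_equal_find_cardinal_conflict : Prop := ∀ (mdds : List (List (Int × (Int × Int)))) (paths : List (List Int)), Dom_find_cardinal_conflict mdds paths → Pre_find_cardinal_conflict mdds paths → Spec_find_cardinal_conflict mdds paths (find_cardinal_conflict mdds paths)

-- ===== LEMMAS AND PROOFS =====

-- the summary B's dict stores at one timestep: a fold over the edges AT that timestep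
def fccStep0 (o : Option (Int × (Int × Int) × Option Int)) (e : Int × (Int × Int)) :
    Option (Int × (Int × Int) × Option Int) :=
  match o with
  | some (c, e0, w) => some (c + 1, e0, if w = some e.2.2 then w else none)
  | none => some (1, e.2, some e.2.2)

def fccSumm (F : List (Int × (Int × Int))) : Option (Int × (Int × Int) × Option Int) :=
  F.foldl fccStep0 none

lemma fccSumm_append (F : List (Int × (Int × Int))) (te : Int × (Int × Int)) :
    fccSumm (F ++ [te]) = fccStep0 (fccSumm F) te := by
  unfold fccSumm
  rw [List.foldl_append, List.foldl_cons, List.foldl_nil]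

-- B's dict answers each timestep with the summary of A's per-timestep filter
lemma get?_summarize (m : List (Int × (Int × Int))) (i : Int) :
    (fcc_summarize m).get? i = fccSumm (m.filter (fun te => te.1 == i)) := by
  induction m using List.reverseRecOn with
  | nil => simp [fcc_summarize, fccSumm, PySem.Dict.get?_empty]
  | append_singleton m te ih =>
    unfold fcc_summarize at ih ⊢
    rw [List.foldl_append, List.foldl_cons, List.foldl_nil]
    set d := List.foldl fcc_step PySem.Dict.empty m with hd
    rw [show fcc_step d te = d.insert te.1 (match d.get? te.1 with
      | some (c, e, w) => (c + 1, e, if w = some te.2.2 then w else none)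
      | none => (1, te.2, some te.2.2)) from rfl]
    rw [PySem.Dict.get?_insert, List.filter_append]
    by_cases h : te.1 = i
    · have hfil : List.filter (fun te_1 => te_1.1 == i) [te] = [te] := by simp [h]
      rw [if_pos h.symm, h, hfil, ih, fccSumm_append]
      cases fccSumm (List.filter (fun te => te.1 == i) m) with
      | none => rfl
      | some v => rfl
    · have hfil : List.filter (fun te_1 => te_1.1 == i) [te] = [] := by simp [h]
      rw [if_neg (fun he => h he.symm), hfil, List.append_nil, ih]

lemma nodup_keys_summarize (m : List (Int × (Int × Int))) : (fcc_summarize m).keys.Nodup := by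
  unfold fcc_summarize fcc_step
  exact PySem.Dict.nodup_keys_foldl_insert_key m (fun te => te.1) _ PySem.Dict.empty
    PySem.Dict.nodup_keys_empty

-- the common-vertex component of the summary fold
lemma wfold_none (F : List (Int × (Int × Int))) :
    F.foldl (fun (w : Option Int) e => if w = some e.2.2 then w else none) none = none := by
  induction F with
  | nil => rfl
  | cons a F ih => simp [ih]

lemma wfold_some (F : List (Int × (Int × Int))) (v : Int) :
    F.foldl (fun (w : Option Int) e => if w = some e.2.2 then w else none) (some v)
      = if ∀ e ∈ F, e.2.2 = v then some v else none := by
  induction F with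
  | nil => simp
  | cons a F ih =>
    simp only [List.foldl_cons]
    by_cases h : a.2.2 = v
    · rw [if_pos (congrArg some h.symm), ih]
      have hiff : (∀ e ∈ a :: F, e.2.2 = v) ↔ ∀ e ∈ F, e.2.2 = v :=
        ⟨fun hh e he => hh e (List.mem_cons_of_mem _ he),
         fun hh e he => by
          rcases List.mem_cons.mp he with rfl | he'
          · exact h
          · exact hh e he'⟩
      exact (if_congr hiff rfl rfl).symm
    · have hcond : ¬ ∀ e ∈ a :: F, e.2.2 = v := fun hall => h (hall a List.mem_cons_self)
      rw [if_neg (fun hh => h (Option.some.inj hh).symm), wfold_none, if_neg hcond]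

-- the summary of a nonempty timestep bucket, in closed form
lemma fccSumm_cons (a : Int × (Int × Int)) (F : List (Int × (Int × Int))) :
    fccSumm (a :: F) = some (1 + (F.length : Int), a.2,
      if ∀ e ∈ F, e.2.2 = a.2.2 then some a.2.2 else none) := by
  have key : ∀ (F : List (Int × (Int × Int))) (c : Int) (e0 : Int × Int) (w : Option Int),
      F.foldl fccStep0 (some (c, e0, w))
      = some (c + (F.length : Int), e0,
          F.foldl (fun (w : Option Int) e => if w = some e.2.2 then w else none) w) := by
    intro F
    induction F with
    | nil => intro c e0 w; simp
    | cons b F ih =>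
      intro c e0 w
      simp only [List.foldl_cons, fccStep0, ih, List.length_cons]
      congr 1
      push_cast
      ring_nf
  unfold fccSumm
  simp only [List.foldl_cons]
  rw [show fccStep0 none a = some (1, a.2, some a.2.2) from rfl, key, wfold_some]

-- a Python set built from a nonempty list is one singleton {x} iff every element is x
lemma ofList_cons_eq_singleton (v x : Int) (l : List Int) :
    PySem.Set.ofList (v :: l) = [x] ↔ (x = v ∧ ∀ y ∈ l, y = v) := by
  constructor
  · intro h
    have hv : v ∈ PySem.Set.ofList (v :: l) := (PySem.Set.mem_ofList _ _).mpr (List.mem_cons_self)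
    rw [h] at hv
    have hxv : x = v := (List.mem_singleton.mp hv).symm
    refine ⟨hxv, fun y hy => ?_⟩
    have : y ∈ PySem.Set.ofList (v :: l) := (PySem.Set.mem_ofList _ _).mpr (List.mem_cons_of_mem _ hy)
    rw [h] at this
    rw [List.mem_singleton.mp this, hxv]
  · rintro ⟨hxv, hall⟩
    subst hxv
    show PySem.Set.ofList (x :: l) = [x]
    have : ∀ (l' : List Int), (∀ y ∈ l', y = x) → l'.foldl PySem.Set.add [x] = [x] := by
      intro l'
      induction l' with
      | nil => intro _; rfl
      | cons y l' ih =>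
        intro h
        have hy : y = x := h y List.mem_cons_self
        have : PySem.Set.add [x] y = [x] := by
          simp [PySem.Set.add, hy]
        simp only [List.foldl_cons, this]
        exact ih (fun z hz => h z (List.mem_cons_of_mem _ hz))
    unfold PySem.Set.ofList
    simp only [List.foldl_cons]
    have hadd : PySem.Set.add PySem.Set.empty x = [x] := rfl
    rw [hadd]
    exact this l hall

-- a list (here: a set) has pyLen 1 iff it is a singleton
lemma len_eq_one_iff (l : List Int) : (PySem.List.len l == 1) = true ↔ ∃ x, l = [x] := by
  rcases l with _ | ⟨a, _ | ⟨b, t⟩⟩ <;> simp [PySem.List.len]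
  omega

-- A's per-timestep loop body equals B's check on the two summaries
lemma cond_eq (F1 F2 : List (Int × (Int × Int))) :
    ((PySem.List.len (F1.map (fun te => (te.2.2, te.2.1))) == 1
        && PySem.List.len (F2.map (fun te => te.2)) == 1
        && decide (F1.map (fun te => (te.2.2, te.2.1)) = F2.map (fun te => te.2))) ||
      (PySem.List.len (PySem.Set.ofList ((F1.map (fun te => (te.2.2, te.2.1))).map (fun e => e.1))) == 1
        && PySem.List.len (PySem.Set.ofList ((F2.map (fun te => te.2)).map (fun e => e.2))) == 1
        && decide (PySem.Set.ofList ((F1.map (fun te => (te.2.2, te.2.1))).map (fun e => e.1))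
                 = PySem.Set.ofList ((F2.map (fun te => te.2)).map (fun e => e.2)))))
    = (match fccSumm F1, fccSumm F2 with
       | some (c1, e1, u1), some (c2, e2, u2) =>
         (c1 == 1 && c2 == 1 && ((e1.2, e1.1) == e2)) || (u1.isSome && u1 == u2)
       | _, _ => false) := by
  rcases F1 with _ | ⟨a, F1⟩
  · simp [fccSumm, PySem.List.len, PySem.Set.ofList, PySem.Set.empty]
  rcases F2 with _ | ⟨b, F2⟩
  · simp [fccSumm, PySem.List.len, PySem.Set.ofList, PySem.Set.empty]
  rw [fccSumm_cons, fccSumm_cons]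
  simp only [List.map_cons, List.map_map]
  -- edge clause
  have hlen : ∀ {α : Type} (x : α) (t : List α),
      (PySem.List.len (x :: t) == 1) = decide (t = []) := by
    intro α x t
    rcases t with _ | ⟨y, t⟩ <;> simp [PySem.List.len]
    omega
  have hc : ∀ (n : Nat), ((1 + (n : Int)) == 1) = decide (n = 0) := by
    intro n
    rw [Bool.eq_iff_iff]
    simp only [beq_iff_eq, decide_eq_true_eq]
    omega
  rw [Bool.eq_iff_iff]
  simp only [Bool.or_eq_true, Bool.and_eq_true, beq_iff_eq, decide_eq_true_eq, hlen, hc,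
    List.map_eq_nil_iff, Option.isSome_iff_exists]
  constructor
  · rintro (⟨⟨h1, h2⟩, h3⟩ | ⟨⟨h1, _h2⟩, h3⟩)
    · subst h1; subst h2
      left
      simp only [List.length_nil]
      refine ⟨⟨by trivial, by trivial⟩, ?_⟩
      simp only [List.map_nil] at h3
      have := List.head_eq_of_cons_eq h3
      simp [this]
    · -- vertex clause
      obtain ⟨x, hx⟩ := len_eq_one_iff _ |>.mp (by simpa using h1)
      rw [hx] at h3
      have h1' := (ofList_cons_eq_singleton _ _ _).mp hx
      have h2' := (ofList_cons_eq_singleton _ _ _).mp h3.symm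
      right
      have hx1 : x = a.2.2 := h1'.1
      have hx2 : x = b.2.2 := h2'.1
      have ha : ∀ e ∈ F1, e.2.2 = a.2.2 := fun e he => h1'.2 _ (List.mem_map.mpr ⟨e, he, rfl⟩)
      have hb : ∀ e ∈ F2, e.2.2 = b.2.2 := fun e he => h2'.2 _ (List.mem_map.mpr ⟨e, he, rfl⟩)
      rw [if_pos ha, if_pos hb]
      exact ⟨⟨a.2.2, rfl⟩, by rw [← hx1, ← hx2]⟩
  · rintro (⟨⟨h1, h2⟩, h3⟩ | ⟨⟨x, hx⟩, hu⟩)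
    · left
      have hF1 : F1 = [] := by
        rcases F1 with _ | _
        · rfl
        · exact absurd h1 (by simp)
      have hF2 : F2 = [] := by
        rcases F2 with _ | _
        · rfl
        · exact absurd h2 (by simp)
      subst hF1; subst hF2
      simp only [List.map_nil]
      refine ⟨⟨by trivial, by trivial⟩, ?_⟩
      simp [h3]
    · right
      -- u1 is some: every target vertex of F1 equals a.2.2, and u2 = u1
      by_cases ha : ∀ e ∈ F1, e.2.2 = a.2.2
      · rw [if_pos ha] at hx hu
        by_cases hb : ∀ e ∈ F2, e.2.2 = b.2.2
        · rw [if_pos hb] at hu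
          have hab : a.2.2 = b.2.2 := by simpa using hu
          have hs1 : PySem.Set.ofList (a.2.2 :: List.map ((fun e => e.1) ∘ fun te => (te.2.2, te.2.1)) F1) = [a.2.2] :=
            (ofList_cons_eq_singleton _ _ _).mpr ⟨rfl, fun y hy => by
              obtain ⟨e, he, rfl⟩ := List.mem_map.mp hy
              exact ha e he⟩
          have hs2 : PySem.Set.ofList (b.2.2 :: List.map ((fun e => e.2) ∘ fun te => te.2) F2) = [a.2.2] :=
            (ofList_cons_eq_singleton _ _ _).mpr ⟨hab, fun y hy => by
              obtain ⟨e, he, rfl⟩ := List.mem_map.mp hy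
              exact hb e he⟩
          refine ⟨⟨?_, ?_⟩, ?_⟩
          · rw [hs1]
            simp [PySem.List.len]
          · rw [hs2]
            simp [PySem.List.len]
          · rw [hs1, hs2]
        · rw [if_neg hb] at hu
          simp at hu
      · rw [if_neg ha] at hx
        simp at hx

-- the range-loop over per-timestep checks equals the items-loop over the summary dict
lemma bridge (m : List (Int × (Int × Int))) (a b : Int)
    (Q : Int → List (Int × (Int × Int)) → Bool)
    (P : Int → (Int × (Int × Int) × Option Int) → Bool)
    (hQ : ∀ i F, Q i F = (match fccSumm F with | some v => P i v | none => false)) :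
    (PySem.List.pyRange a b 1).any (fun i => Q i (m.filter (fun te => te.1 == i)))
    = (fcc_summarize m).items.any (fun tv => decide (a ≤ tv.1 ∧ tv.1 < b) && P tv.1 tv.2) := by
  rw [Bool.eq_iff_iff]
  simp only [List.any_eq_true]
  constructor
  · rintro ⟨i, hi, hQi⟩
    rw [hQ] at hQi
    cases hs : fccSumm (m.filter (fun te => te.1 == i)) with
    | none => rw [hs] at hQi; simp at hQi
    | some v =>
      rw [hs] at hQi
      refine ⟨(i, v), ?_, ?_⟩
      · exact PySem.Dict.mem_items_of_get?_eq_some _ (by rw [get?_summarize, hs])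
      · have := PySem.List.mem_pyRange_one.mp hi
        simp only [this, and_self, decide_true, Bool.true_and]
        exact hQi
  · rintro ⟨⟨t, v⟩, hmem, hP⟩
    simp only [Bool.and_eq_true, decide_eq_true_eq] at hP
    refine ⟨t, PySem.List.mem_pyRange_one.mpr hP.1, ?_⟩
    rw [hQ]
    have hget : (fcc_summarize m).get? t = some v :=
      PySem.Dict.get?_of_mem_items _ hmem (nodup_keys_summarize m)
    rw [get?_summarize] at hget
    rw [hget]
    exact hP.2

-- A's extended-conflict body on one timestep bucket equals B's summary check
lemma ext_cond_eq (F : List (Int × (Int × Int))) (vertex : Int) :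
    (PySem.List.len (PySem.Set.ofList (F.map (fun te => te.2.2))) == 1
      && decide (PySem.Set.ofList (F.map (fun te => te.2.2)) = [vertex]))
    = (match fccSumm F with | some v => v.2.2 == some vertex | none => false) := by
  rcases F with _ | ⟨a, F⟩
  · simp [fccSumm, PySem.Set.ofList, PySem.Set.empty]
  rw [fccSumm_cons]
  simp only [List.map_cons]
  rw [Bool.eq_iff_iff]
  simp only [Bool.and_eq_true, beq_iff_eq, decide_eq_true_eq]
  constructor
  · rintro ⟨_, h⟩
    obtain ⟨hv, hall⟩ := (ofList_cons_eq_singleton _ _ _).mp h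
    have ha : ∀ e ∈ F, e.2.2 = a.2.2 := fun e he => hall e.2.2 (List.mem_map.mpr ⟨e, he, rfl⟩)
    rw [if_pos ha]
    simp [hv]
  · intro h
    by_cases ha : ∀ e ∈ F, e.2.2 = a.2.2
    · rw [if_pos ha] at h
      have hv : a.2.2 = vertex := by simpa using h
      have hs : PySem.Set.ofList (a.2.2 :: F.map (fun te => te.2.2)) = [vertex] :=
        (ofList_cons_eq_singleton _ _ _).mpr
          ⟨hv.symm, by intro y hy; obtain ⟨e, he, rfl⟩ := List.mem_map.mp hy; exact ha e he⟩
      exact ⟨by rw [hs]; simp [PySem.List.len], hs⟩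
    · rw [if_neg ha] at h; simp at h

-- A's pre-filter 't >= start' is absorbed by the per-timestep filter once start ≤ i
lemma filter_ge_filter (m : List (Int × (Int × Int))) (s i : Int) (h : s ≤ i) :
    ((m.filter (fun te => decide (s ≤ te.1))).filter (fun te => te.1 == i))
    = m.filter (fun te => te.1 == i) := by
  rw [List.filter_filter]
  refine List.filter_congr ?_
  intro te _
  by_cases hi : te.1 = i
  · simp [hi, h]
  · simp [hi]

-- ===== VERDICT (by name: the statement is the Claim_ definition above) =====
theorem find_cardinal_conflict_spec : Claim_equal_find_cardinal_conflict := by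
  intro mdds paths _hdom _hpre
  unfold Spec_find_cardinal_conflict
  unfold find_cardinal_conflict find_cardinal_conflict_alt find_extended_mdd_conflict
  simp only [cond_eq, get?_summarize]
  refine if_congr (Eq.to_iff (congrArg (fun b => b = true) ?_)) rfl ?_
  · -- main loop: range-scan of A = items-scan of B
    exact bridge (mdds.getD 0 []) 1
      (min (PySem.List.len (paths.getD 0 [])) (PySem.List.len (paths.getD 1 [])))
      (fun i F =>
        (match fccSumm F, fccSumm ((mdds.getD 1 []).filter (fun te => te.1 == i)) with
         | some (c1, e1, u1), some (c2, e2, u2) =>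
           (c1 == 1 && c2 == 1 && ((e1.2, e1.1) == e2)) || (u1.isSome && u1 == u2)
         | _, _ => false))
      (fun t v =>
        (match fccSumm ((mdds.getD 1 []).filter (fun te => te.1 == t)) with
         | none => false
         | some (c2, e2, u2) =>
           (v.1 == 1 && c2 == 1 && ((v.2.1.2, v.2.1.1) == e2)) || (v.2.2.isSome && v.2.2 == u2)))
      (by
        intro i F
        beta_reduce
        cases fccSumm F <;>
          cases fccSumm ((mdds.getD 1 []).filter (fun te => te.1 == i)) <;> rfl)
  · -- extended conflict: same shape on both sides
    refine if_congr Iff.rfl rfl ?_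
    rcases lt_trichotomy (PySem.List.len (paths.getD 0 [])) (PySem.List.len (paths.getD 1 [])) with hlt | heq | hgt
    · have hngt : ¬ PySem.List.len (paths.getD 0 []) > PySem.List.len (paths.getD 1 []) := lt_asymm hlt
      simp only [if_neg hngt, if_pos hlt]
      refine Eq.trans (PySem.List.any_congr_mem (fun i hi => ?_))
        (bridge (mdds.getD 1 [])
          (min (PySem.List.len (paths.getD 0 [])) (PySem.List.len (paths.getD 1 [])))
          (max (PySem.List.len (paths.getD 0 [])) (PySem.List.len (paths.getD 1 [])))
          (fun i F => (match fccSumm F with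
            | some v => v.2.2 == some (PySem.List.pyGetD (paths.getD 0 []) (-1) 0)
            | none => false))
          (fun t v => v.2.2 == some (PySem.List.pyGetD (paths.getD 0 []) (-1) 0))
          (fun i F => by beta_reduce; cases fccSumm F <;> rfl))
      have hge := (PySem.List.mem_pyRange_one.mp hi).1
      rw [filter_ge_filter _ _ _ hge, ext_cond_eq]
    · -- equal lengths: the timestep range is empty and every guard fails
      have hempty : PySem.List.pyRange
          (min (PySem.List.len (paths.getD 0 [])) (PySem.List.len (paths.getD 1 [])))
          (max (PySem.List.len (paths.getD 0 [])) (PySem.List.len (paths.getD 1 []))) 1 = [] := by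
        rw [List.eq_nil_iff_forall_not_mem]
        intro x hx
        have := PySem.List.mem_pyRange_one.mp hx
        omega
      rw [hempty]
      simp only [List.any_nil]
      symm
      rw [List.any_eq_false]
      intro tv _
      have hguard : ¬ (min (PySem.List.len (paths.getD 0 [])) (PySem.List.len (paths.getD 1 [])) ≤ tv.1 ∧
          tv.1 < max (PySem.List.len (paths.getD 0 [])) (PySem.List.len (paths.getD 1 []))) := by omega
      rw [decide_eq_false hguard, Bool.false_and]
      simp
    · have hgt' : PySem.List.len (paths.getD 0 []) > PySem.List.len (paths.getD 1 []) := hgt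
      have hnlt : ¬ PySem.List.len (paths.getD 0 []) < PySem.List.len (paths.getD 1 []) := lt_asymm hgt
      simp only [if_pos hgt', if_neg hnlt]
      refine Eq.trans (PySem.List.any_congr_mem (fun i hi => ?_))
        (bridge (mdds.getD 0 [])
          (min (PySem.List.len (paths.getD 0 [])) (PySem.List.len (paths.getD 1 [])))
          (max (PySem.List.len (paths.getD 0 [])) (PySem.List.len (paths.getD 1 [])))
          (fun i F => (match fccSumm F with
            | some v => v.2.2 == some (PySem.List.pyGetD (paths.getD 1 []) (-1) 0)
            | none => false))
          (fun t v => v.2.2 == some (PySem.List.pyGetD (paths.getD 1 []) (-1) 0))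
          (fun i F => by beta_reduce; cases fccSumm F <;> rfl))
      have hge := (PySem.List.mem_pyRange_one.mp hi).1
      rw [filter_ge_filter _ _ _ hge, ext_cond_eq]
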